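-- pv_equiv track=rewrite | github.com/Dinhillel/Friendly-eye | main.py | summarize_detections
-- ===== SOURCE A (Python) =====
-- from collections import Counter
--
-- def summarize_detections(detections):
--     if not detections:
--         return "no notable objects"
--     counts = Counter([d["label"] for d in detections])
--     parts = []
--     for label, n in counts.items():
--         if n == 1:
--             parts.append(label)
--         else:
--             parts.append(f"{n} {label}s")
--     return ", ".join(parts)
-- ===== SOURCE B (Python) =====
-- def summarize_detections(detections):
--     if not detections:
--         return "no notable objects"
--
--     def describe(labels):
--         # partition recursion: take the first label, strip all its duplicates
--         # from the remainder, derive its count from the length drop, recurse.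
--         if not labels:
--             return []
--         first = labels[0]
--         rest = [x for x in labels[1:] if x != first]
--         n = len(labels) - len(rest)
--         part = first if n == 1 else f"{n} {first}s"
--         return [part] + describe(rest)
--
--     return ", ".join(describe([d["label"] for d in detections]))
-- ===== Notes on version B (the rewrite author's own statement) =====
-- stated objective: alternative
-- what changed: Replaces the Counter table build plus items iteration with a partition recursion: peel the first label, remove all its duplicates from the remainder, derive its count from the length drop, and recurse on the stripped list; no count table or counting scan is ever maintained.
import Mathlib
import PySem

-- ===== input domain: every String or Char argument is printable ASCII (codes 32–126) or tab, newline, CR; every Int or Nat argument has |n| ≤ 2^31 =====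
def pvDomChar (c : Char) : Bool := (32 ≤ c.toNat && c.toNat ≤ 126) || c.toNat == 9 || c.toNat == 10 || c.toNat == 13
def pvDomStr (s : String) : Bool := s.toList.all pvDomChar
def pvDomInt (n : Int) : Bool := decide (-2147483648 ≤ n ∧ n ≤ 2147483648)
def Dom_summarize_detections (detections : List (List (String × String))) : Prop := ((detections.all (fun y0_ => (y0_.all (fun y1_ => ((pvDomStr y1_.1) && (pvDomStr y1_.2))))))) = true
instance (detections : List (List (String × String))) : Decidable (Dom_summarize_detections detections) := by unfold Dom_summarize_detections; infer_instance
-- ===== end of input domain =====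

-- B replaces A's Counter table (built in one pass, then iterated) by a partition
-- recursion: peel the first label, strip its duplicates from the remainder, get its
-- count from the length drop, recurse on the stripped list. Alternative, not faster.

-- ===== PORT A =====
def summarize_detections (detections : List (List (String × String))) : String :=
  if detections = [] then "no notable objects"
  else
    let labels := detections.map (fun d => ((PySem.Dict.mk d).get? "label").getD "")
    let counts := PySem.Dict.counter labels
    let parts := counts.items.foldl
      (fun ps p => ps ++ [if p.2 = 1 then p.1 else PySem.Int.toStr p.2 ++ " " ++ p.1 ++ "s"]) []
    PySem.Str.join ", " parts

-- ===== PORT B =====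
def sdDescribe (labels : List String) : List String :=
  match labels with
  | [] => []
  | first :: tl =>
    let rest := tl.filter (fun x => x != first)
    let n : Int := ((first :: tl).length : Int) - (rest.length : Int)
    (if n = 1 then first else PySem.Int.toStr n ++ " " ++ first ++ "s") :: sdDescribe rest
termination_by labels.length
decreasing_by
  simpa using Nat.lt_succ_of_le (List.length_filter_le _ _)

def summarize_detections_alt (detections : List (List (String × String))) : String :=
  if detections = [] then "no notable objects"
  else
    PySem.Str.join ", "
      (sdDescribe (detections.map (fun d => ((PySem.Dict.mk d).get? "label").getD "")))

-- ===== PRECONDITION & SPEC =====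
-- Pre_ excludes detections where some dict lacks the key "label": there Python A raises KeyError.
def Pre_summarize_detections (detections : List (List (String × String))) : Prop :=
  ∀ d ∈ detections, ((PySem.Dict.mk d).get? "label").isSome = true
instance (detections : List (List (String × String))) : Decidable (Pre_summarize_detections detections) := by unfold Pre_summarize_detections; infer_instance
def pvWitness_summarize_detections : (List (List (String × String))) :=
  [[("label", "cat")], [("label", "dog")], [("label", "cat")]]
def Spec_summarize_detections (detections : List (List (String × String))) (out : String) : Prop := out = summarize_detections_alt detections
instance (detections : List (List (String × String))) (out : String) : Decidable (Spec_summarize_detections detections out) := by unfold Spec_summarize_detections; infer_instance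

-- ===== CLAIM (what is proved, stated in full; the proofs are below) =====
def Claim_equal_summarize_detections : Prop := ∀ (detections : List (List (String × String))), Dom_summarize_detections detections → Pre_summarize_detections detections → Spec_summarize_detections detections (summarize_detections detections)

-- ===== LEMMAS AND PROOFS =====


lemma sd_ofList_filter (p : String → Bool) (xs : List String) :
    PySem.Set.ofList (xs.filter p) = (PySem.Set.ofList xs).filter p := by
  induction xs using List.reverseRecOn with
  | nil => rfl
  | append_singleton xs y ih =>
    rw [List.filter_append, PySem.Set.ofList_append_singleton, PySem.Set.add_eq_ite]
    by_cases hp : p y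
    · rw [show List.filter p [y] = [y] from by simp [hp]]
      by_cases hm : y ∈ xs
      · rw [if_pos (by simpa [PySem.Set.mem_ofList] using hm)]
        have h1 : y ∈ PySem.Set.ofList (xs.filter p) := by
          simp [PySem.Set.mem_ofList, List.mem_filter, hm, hp]
        rw [PySem.Set.ofList_append_singleton, PySem.Set.add_of_mem h1, ih]
      · rw [if_neg (by simpa [PySem.Set.mem_ofList] using hm)]
        have h1 : y ∉ PySem.Set.ofList (xs.filter p) := by
          simp [PySem.Set.mem_ofList, List.mem_filter]; intro h; exact absurd h hm
        rw [PySem.Set.ofList_append_singleton, PySem.Set.add_of_not_mem h1, ih,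
          List.filter_append]
        simp [hp]
    · rw [show List.filter p [y] = [] from by simp [hp], List.append_nil]
      by_cases hm : y ∈ xs
      · rw [if_pos (by simpa [PySem.Set.mem_ofList] using hm)]; exact ih
      · rw [if_neg (by simpa [PySem.Set.mem_ofList] using hm), List.filter_append, ih]
        simp [hp]

lemma sd_dedup_cons (l : String) (tl : List String) :
    PySem.List.dedup (l :: tl) = l :: PySem.List.dedup (tl.filter (fun x => x != l)) := by
  rw [PySem.List.dedup_eq_ofList, PySem.List.dedup_eq_ofList, PySem.Set.ofList_cons,
    sd_ofList_filter]
  congr 1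

lemma sd_len (first : String) (tl : List String) :
    (tl.filter (fun x => x != first)).length + tl.count first = tl.length := by
  induction tl with
  | nil => simp
  | cons a l ihl =>
    by_cases ha : a = first <;>
      simp [ha, bne] at ihl ⊢ <;> omega

lemma sd_describe_eq_aux (N : Nat) : ∀ labels : List String, labels.length ≤ N →
    sdDescribe labels = (PySem.List.dedup labels).map
      (fun k => if (labels.count k : Int) = 1 then k
                else PySem.Int.toStr (labels.count k : Int) ++ " " ++ k ++ "s") := by
  induction N with
  | zero =>
    intro labels h
    have : labels = [] := List.eq_nil_of_length_eq_zero (Nat.le_zero.mp h)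
    subst this
    simp [sdDescribe]
  | succ N ih =>
    intro labels h
    match labels with
    | [] => simp [sdDescribe]
    | first :: tl =>
      rw [sdDescribe]
      have hlen := sd_len first tl
      have hrest : (tl.filter (fun x => x != first)).length ≤ tl.length :=
        List.length_filter_le _ _
      have hn : ((first :: tl).length : Int) - ((tl.filter (fun x => x != first)).length : Int)
          = ((first :: tl).count first : Int) := by
        simp only [List.length_cons, List.count_cons_self]
        push_cast
        omega
      rw [hn, sd_dedup_cons, List.map_cons,
        ih (tl.filter (fun x => x != first)) (le_trans hrest (Nat.le_of_succ_le_succ h))]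
      congr 1
      apply List.map_congr_left
      intro k hk
      have hk' : k ∈ tl.filter (fun x => x != first) := by
        rwa [PySem.List.mem_dedup] at hk
      have hkne : k ≠ first := by
        have := (List.mem_filter.mp hk').2; simpa using this
      have hc : (tl.filter (fun x => x != first)).count k = (first :: tl).count k := by
        rw [List.count_filter (by simp [hkne])]
        exact (List.count_cons_of_ne (Ne.symm hkne)).symm
      rw [hc]


lemma sd_describe_eq (labels : List String) :
    sdDescribe labels = (PySem.List.dedup labels).map
      (fun k => if (labels.count k : Int) = 1 then k
                else PySem.Int.toStr (labels.count k : Int) ++ " " ++ k ++ "s") :=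
  sd_describe_eq_aux labels.length labels le_rfl

-- ===== VERDICT (by name: the statement is the Claim_ definition above) =====
theorem summarize_detections_spec : Claim_equal_summarize_detections := by
  intro detections _ _
  unfold Spec_summarize_detections summarize_detections summarize_detections_alt
  by_cases h : detections = []
  · simp [h]
  · simp only [if_neg h]
    rw [PySem.Dict.items_counter, PySem.List.foldl_append_singleton_eq_map, sd_describe_eq,
      PySem.List.dedup_eq_ofList, List.map_map]
    rfl
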